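-- pv_equiv track=rewrite | github.com/ashish9696/Resume-parser-evaluation-insight | parser.py | split_resumes
-- ===== SOURCE A (Python) =====
-- def split_resumes(texts):
--     """Separate different resumes in a mixed PDF based on heuristic rules."""
--     separator_keywords = ["Resume", "Curriculum Vitae",]
--     resumes = []
--     current_resume = []
--
--     for page_text in texts:
--         if any(keyword in page_text for keyword in separator_keywords) and current_resume:
--             resumes.append(" ".join(current_resume))
--             current_resume = []
--         current_resume.append(page_text)
--
--     if current_resume:
--         resumes.append(" ".join(current_resume))
--
--     return resumes
-- ===== SOURCE B (Python) =====
-- def split_resumes(texts):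
--     """Separate different resumes in a mixed PDF based on heuristic rules."""
--     separator_keywords = ["Resume", "Curriculum Vitae"]
--
--     def has_kw(s):
--         return any(k in s for k in separator_keywords)
--
--     out = []
--     i = 0
--     n = len(texts)
--     while i < n:
--         j = i + 1
--         while j < n and not has_kw(texts[j]):
--             j += 1
--         out.append(" ".join(texts[i:j]))
--         i = j
--     return out
-- ===== Notes on version B (the rewrite author's own statement) =====
-- stated objective: alternative
-- what changed: Replaces A's append/flush accumulator (current_resume buffer flushed on each keyword page) with a two-pointer span scan: each group is the current page plus the maximal run of following non-keyword pages, joined by slicing.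
import Mathlib
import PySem

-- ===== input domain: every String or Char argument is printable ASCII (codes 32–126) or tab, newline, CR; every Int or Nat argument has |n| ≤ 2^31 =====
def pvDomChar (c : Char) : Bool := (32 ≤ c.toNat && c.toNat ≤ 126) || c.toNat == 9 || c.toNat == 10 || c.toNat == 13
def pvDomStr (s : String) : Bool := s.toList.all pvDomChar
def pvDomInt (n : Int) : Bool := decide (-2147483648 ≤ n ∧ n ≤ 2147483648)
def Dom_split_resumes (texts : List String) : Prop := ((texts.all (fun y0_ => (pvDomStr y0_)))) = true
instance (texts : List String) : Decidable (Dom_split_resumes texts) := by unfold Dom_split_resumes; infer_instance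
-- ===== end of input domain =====

-- B replaces A's append/flush accumulator with a two-pointer span scan (each group = page + following
-- run of non-keyword pages, joined from a slice); objective: alternative decomposition, same cost.

-- ===== PORT A =====
-- the loop over pages with state (resumes, current_resume), then the final flush
def splitA_loop : List String → List String → List String → List String
  | resumes, current, [] =>
      if current ≠ [] then resumes ++ [PySem.Str.join " " current] else resumes
  | resumes, current, p :: rest =>
      if ((["Resume", "Curriculum Vitae"].any fun k => PySem.Str.isIn k p) = true) ∧ current ≠ [] then
        splitA_loop (resumes ++ [PySem.Str.join " " current]) [p] rest
      else
        splitA_loop resumes (current ++ [p]) rest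

def split_resumes (texts : List String) : List String :=
  splitA_loop [] [] texts

-- ===== PORT B =====
def pvHasKw (s : String) : Bool :=
  ["Resume", "Curriculum Vitae"].any fun k => PySem.Str.isIn k s

-- the outer while loop; the inner while (advance j over non-keyword pages) is the span
-- takeWhile/dropWhile of the remaining pages
def split_resumes_alt : List String → List String
  | [] => []
  | p :: rest =>
      PySem.Str.join " " (p :: rest.takeWhile (fun s => !pvHasKw s)) ::
        split_resumes_alt (rest.dropWhile (fun s => !pvHasKw s))
  termination_by ts => ts.length
  decreasing_by
    simpa using Nat.lt_succ_of_le (List.length_dropWhile_le _ _)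

-- ===== PRECONDITION & SPEC =====
def Spec_split_resumes (texts : List String) (out : List String) : Prop := out = split_resumes_alt texts
instance (texts : List String) (out : List String) : Decidable (Spec_split_resumes texts out) := by unfold Spec_split_resumes; infer_instance

-- ===== CLAIM (what is proved, stated in full; the proofs are below) =====
def Claim_equal_split_resumes : Prop := ∀ (texts : List String), Dom_split_resumes texts → Spec_split_resumes texts (split_resumes texts)

-- ===== LEMMAS AND PROOFS =====
-- Invariant of A's loop: with a nonempty current buffer, the flushed result is the emitted
-- resumes followed by (current ++ the non-keyword run) joined, then B's grouping of the rest.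
lemma splitA_loop_eq (ts : List String) : ∀ (res cur : List String), cur ≠ [] →
    splitA_loop res cur ts =
      res ++ (PySem.Str.join " " (cur ++ ts.takeWhile (fun s => !pvHasKw s)) ::
        split_resumes_alt (ts.dropWhile (fun s => !pvHasKw s))) := by
  induction ts with
  | nil =>
      intro res cur hcur
      simp [splitA_loop, hcur, split_resumes_alt]
  | cons p rest ih =>
      intro res cur hcur
      by_cases hk : pvHasKw p = true
      · rw [splitA_loop, if_pos ⟨hk, hcur⟩,
          ih (res ++ [PySem.Str.join " " cur]) [p] (by simp)]
        simp [List.takeWhile, List.dropWhile, hk, split_resumes_alt]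
      · rw [splitA_loop, if_neg (fun h => hk h.1)]
        rw [ih res (cur ++ [p]) (by simp)]
        simp [List.takeWhile, List.dropWhile, hk]

-- ===== VERDICT (by name: the statement is the Claim_ definition above) =====
theorem split_resumes_spec : Claim_equal_split_resumes := by
  intro texts _
  show split_resumes texts = split_resumes_alt texts
  cases texts with
  | nil => simp [split_resumes, splitA_loop, split_resumes_alt]
  | cons p rest =>
      rw [split_resumes, splitA_loop, if_neg (by simp), List.nil_append,
        splitA_loop_eq rest [] [p] (by simp)]
      simp [split_resumes_alt]
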